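-- pv_equiv track=rewrite | github.com/withoutCoffee/Algoritmos-sobre-Grafos | prim.py | menorPos
-- ===== SOURCE A (Python) =====
-- def menorPos(vetor):
--     maior = vetor[0][0]
--     menor = maior
--     exit = vetor[0]
--     for i in range(len(vetor)):
--         for j in range(len(vetor[i])):
--             if(maior<vetor[i][j]):
--                 maior = vetor[i][j]
--             elif(menor > vetor[i][j]):
--                 menor = vetor[i][j]
--                 exit = vetor[i]
--     return exit #retorna vetor linha com a menor posição da matriz dada
-- ===== SOURCE B (Python) =====
-- def menorPos(vetor):
--     # pass 1: find the global minimum (seed with vetor[0][0], as the task requires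
--     # a non-empty matrix with a non-empty first row)
--     menor = vetor[0][0]
--     for row in vetor:
--         for x in row:
--             if x < menor:
--                 menor = x
--     # pass 2: return the first row that contains the minimum
--     for row in vetor:
--         if menor in row:
--             return row
-- ===== Notes on version B (the rewrite author's own statement) =====
-- stated objective: simpler
-- what changed: Replaces A's single pass carrying a (max, min, best-row) triple with a two-pass decomposition: first compute the global minimum, then return the first row containing it via 'min in row'; the useless max tracking disappears.
import Mathlib
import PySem

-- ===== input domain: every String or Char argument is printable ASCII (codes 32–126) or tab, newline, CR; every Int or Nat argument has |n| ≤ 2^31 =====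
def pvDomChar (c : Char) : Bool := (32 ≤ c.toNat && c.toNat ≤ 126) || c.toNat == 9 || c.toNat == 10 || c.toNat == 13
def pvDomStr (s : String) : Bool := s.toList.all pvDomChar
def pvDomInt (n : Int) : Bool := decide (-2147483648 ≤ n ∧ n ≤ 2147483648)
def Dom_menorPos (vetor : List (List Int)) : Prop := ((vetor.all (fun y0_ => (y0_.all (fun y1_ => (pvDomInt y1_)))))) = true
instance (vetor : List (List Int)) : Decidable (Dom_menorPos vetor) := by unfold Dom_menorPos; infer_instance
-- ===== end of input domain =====

-- B replaces A's single pass carrying a (max, min, best-row) triple with a simpler two-pass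
-- decomposition (find the global minimum, then return the first row containing it); the timing
-- run measured B faster by a constant factor (lighter inner loop).

-- ===== PORT A =====
-- state s = (maior, menor, exit); one step of A's inner loop over the current row
def menorStep (row : List Int) (s : Int × Int × List Int) (x : Int) : Int × Int × List Int :=
  if s.1 < x then (x, s.2.1, s.2.2)
  else if s.2.1 > x then (s.1, x, row)
  else s

def menorPos (vetor : List (List Int)) : List Int :=
  -- vetor[0][0] / vetor[0]; Pre_ guarantees both exist (Python raises IndexError otherwise)
  let maior := (vetor.headD []).headD 0
  -- for i in range(len(vetor)): for j in range(len(vetor[i])): … — the indices are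
  -- always in range, so this iterates the rows, then each row's elements, in order
  let s := vetor.foldl (fun s row => row.foldl (menorStep row) s) (maior, maior, vetor.headD [])
  s.2.2

-- ===== PORT B =====
def menorPos_alt (vetor : List (List Int)) : List Int :=
  let m0 := (vetor.headD []).headD 0          -- menor = vetor[0][0]
  let m := vetor.foldl (fun m row => row.foldl (fun m x => if x < m then x else m) m) m0
  match vetor.find? (fun row => row.contains m) with
  | some r => r
  | none => []   -- unreachable under Pre_ (the minimum occurs in some row); Python falls off and returns None

-- ===== PRECONDITION & SPEC =====
-- Pre_ excludes exactly the inputs where Python A raises IndexError: empty matrix or empty first row.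
def Pre_menorPos (vetor : List (List Int)) : Prop := vetor ≠ [] ∧ vetor.headD [] ≠ []
instance (vetor : List (List Int)) : Decidable (Pre_menorPos vetor) := by unfold Pre_menorPos; infer_instance
def pvWitness_menorPos : List (List Int) := [[3, 1], [2]]

def Spec_menorPos (vetor : List (List Int)) (out : List Int) : Prop := out = menorPos_alt vetor
instance (vetor : List (List Int)) (out : List Int) : Decidable (Spec_menorPos vetor out) := by unfold Spec_menorPos; infer_instance

-- ===== CLAIM (what is proved, stated in full; the proofs are below) =====
def Claim_equal_menorPos : Prop := ∀ (vetor : List (List Int)), Dom_menorPos vetor → Pre_menorPos vetor → Spec_menorPos vetor (menorPos vetor)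

-- ===== LEMMAS AND PROOFS =====

theorem foldl_min_le (r : List Int) (m : Int) : r.foldl min m ≤ m := by
  induction r generalizing m with
  | nil => exact le_refl m
  | cons x xs ih => exact le_trans (ih (min m x)) (min_le_left m x)

theorem foldl_max_ge (r : List Int) (M : Int) : M ≤ r.foldl max M := by
  induction r generalizing M with
  | nil => exact le_refl M
  | cons x xs ih => exact le_trans (le_max_left M x) (ih (max M x))

theorem foldl_min_le_mem (r : List Int) (m x : Int) (hx : x ∈ r) : r.foldl min m ≤ x := by
  induction r generalizing m with
  | nil => cases hx
  | cons y ys ih =>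
    simp only [List.foldl_cons]
    rcases List.mem_cons.mp hx with h | h
    · subst h
      exact le_trans (foldl_min_le ys (min m x)) (min_le_right m x)
    · exact ih (min m y) h

theorem foldl_min_mem (r : List Int) (m : Int) : r.foldl min m = m ∨ r.foldl min m ∈ r := by
  induction r generalizing m with
  | nil => exact Or.inl rfl
  | cons x xs ih =>
    rcases ih (min m x) with h | h
    · rcases le_total m x with hmx | hxm
      · left; rw [List.foldl_cons, h, min_eq_left hmx]
      · right; rw [List.foldl_cons, h, min_eq_right hxm]; exact List.mem_cons_self
    · right; exact List.mem_cons_of_mem x h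

theorem rowsMin_le (rs : List (List Int)) (m : Int) :
    rs.foldl (fun a r => r.foldl min a) m ≤ m := by
  induction rs generalizing m with
  | nil => exact le_refl m
  | cons r rest ih => exact le_trans (ih (r.foldl min m)) (foldl_min_le r m)

theorem rowsMin_mem (rs : List (List Int)) (m : Int) :
    rs.foldl (fun a r => r.foldl min a) m = m ∨
    ∃ r ∈ rs, rs.foldl (fun a r => r.foldl min a) m ∈ r := by
  induction rs generalizing m with
  | nil => exact Or.inl rfl
  | cons r rest ih =>
    rcases ih (r.foldl min m) with h | h
    · simp only [List.foldl_cons, h]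
      rcases foldl_min_mem r m with h2 | h2
      · exact Or.inl h2
      · exact Or.inr ⟨r, List.mem_cons_self, h2⟩
    · obtain ⟨r', hr', hm⟩ := h
      exact Or.inr ⟨r', List.mem_cons_of_mem r hr', hm⟩

-- B's inner lambda is just min
theorem step_min (m x : Int) : (if x < m then x else m) = min m x := by
  rcases lt_or_ge x m with h | h
  · simp [min_def, h, le_of_lt h, not_le.mpr h]
  · simp [min_def, h, not_lt.mpr h]

theorem foldl_step_min (r : List Int) (m : Int) :
    r.foldl (fun m x => if x < m then x else m) m = r.foldl min m := by
  induction r generalizing m with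
  | nil => rfl
  | cons x xs ih => simp only [List.foldl_cons, step_min]

theorem rowsB_min (rs : List (List Int)) (m : Int) :
    rs.foldl (fun m row => row.foldl (fun m x => if x < m then x else m) m) m =
    rs.foldl (fun a r => r.foldl min a) m := by
  induction rs generalizing m with
  | nil => rfl
  | cons r rest ih => simp only [List.foldl_cons, foldl_step_min]

-- characterisation of A's inner loop over one row
theorem rowA (row : List Int) (r : List Int) (M m : Int) (e : List Int) (h : m ≤ M) :
    row.foldl (menorStep r) (M, m, e) =
      (row.foldl max M, row.foldl min m, if row.foldl min m < m then r else e) := by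
  induction row generalizing M m e with
  | nil => simp [lt_irrefl]
  | cons x xs ih =>
    simp only [List.foldl_cons]
    by_cases hM : M < x
    · have hmx : m ≤ x := le_of_lt (lt_of_le_of_lt h hM)
      have : menorStep r (M, m, e) x = (x, m, e) := by
        simp [menorStep, hM]
      rw [this, ih x m e hmx]
      simp [max_eq_right (le_of_lt hM), min_eq_left hmx]
    · by_cases hm : m > x
      · have : menorStep r (M, m, e) x = (M, x, r) := by
          simp [menorStep, hM, hm]
        rw [this, ih M x r (le_trans (le_of_lt hm) h)]
        have hcond : xs.foldl min x < m := lt_of_le_of_lt (foldl_min_le xs x) hm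
        simp [max_eq_left (not_lt.mp hM), min_eq_right (le_of_lt hm), hcond]
      · have : menorStep r (M, m, e) x = (M, m, e) := by
          simp [menorStep, hM, hm]
        rw [this, ih M m e h]
        simp [max_eq_left (not_lt.mp hM), min_eq_left (not_lt.mp (by exact hm))]

-- characterisation of A's outer loop
theorem rowsA (rs : List (List Int)) (M m : Int) (e : List Int) (h : m ≤ M) :
    rs.foldl (fun s row => row.foldl (menorStep row) s) (M, m, e) =
      (rs.foldl (fun a r => r.foldl max a) M,
       rs.foldl (fun a r => r.foldl min a) m,
       if rs.foldl (fun a r => r.foldl min a) m < m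
       then (rs.find? (fun row => row.contains (rs.foldl (fun a r => r.foldl min a) m))).getD e
       else e) := by
  induction rs generalizing M m e with
  | nil => simp [lt_irrefl]
  | cons row rest ih =>
    simp only [List.foldl_cons]
    rw [rowA row row M m e h]
    set m1 := row.foldl min m with hm1
    set M1 := row.foldl max M with hM1
    have h1 : m1 ≤ M1 := le_trans (foldl_min_le row m) (le_trans h (foldl_max_ge row M))
    rw [ih M1 m1 _ h1]
    set m' := rest.foldl (fun a r => r.foldl min a) m1 with hm'
    have hle : m' ≤ m1 := rowsMin_le rest m1
    by_cases hlt : m' < m1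
    · -- minimum found strictly below row's running min: it lives in rest, not in row
      have hrow : row.contains m' = false := by
        rw [List.contains_eq_any_beq]
        simp only [List.any_eq_false]
        intro x hx
        have : m' < x := lt_of_lt_of_le hlt (by rw [hm1] at *; exact foldl_min_le_mem row m x hx)
        simp [ne_of_lt this]
      have hfind : ∃ y, rest.find? (fun row => row.contains m') = some y := by
        rcases rowsMin_mem rest m1 with hc | hc
        · rw [← hm'] at hc; exact absurd hc (ne_of_lt hlt)
        · obtain ⟨r', hr', hmem⟩ := hc
          rw [← hm'] at hmem
          have : (rest.find? (fun row => row.contains m')).isSome := by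
            rw [List.find?_isSome]
            exact ⟨r', hr', by simpa using hmem⟩
          exact Option.isSome_iff_exists.mp this
      obtain ⟨y, hy⟩ := hfind
      have hm'm : m' < m := lt_of_lt_of_le hlt (foldl_min_le row m)
      have hy' : List.find? (fun row => decide (m' ∈ row)) rest = some y := by
        simpa using hy
      simp only [hlt, if_pos, List.find?_cons, hrow]
      simp [hy', hm'm]
    · -- no strictly smaller element in rest: m' = m1
      have heq : m' = m1 := le_antisymm hle (not_lt.mp hlt)
      simp only [hlt, if_neg, ite_false]
      by_cases h2 : m1 < m
      · -- the minimum is in this row, so it is the first row containing it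
        have hmem : m1 ∈ row := by
          rcases foldl_min_mem row m with hc | hc
          · rw [← hm1] at hc; exact absurd hc (ne_of_lt h2)
          · rwa [← hm1] at hc
        have hfind : List.find? (fun r => decide (m' ∈ r)) (row :: rest) = some row := by
          rw [List.find?_cons]
          simp [heq, hmem]
        rw [heq] at hfind ⊢
        simp [h2, hfind]
      · rw [heq]; simp [h2]

-- ===== VERDICT (by name: the statement is the Claim_ definition above) =====
theorem menorPos_spec : Claim_equal_menorPos := by
  intro vetor _ hpre
  obtain ⟨hne, hrow⟩ := hpre
  obtain ⟨r0, vs, rfl⟩ : ∃ r0 vs, vetor = r0 :: vs := by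
    cases vetor with
    | nil => exact absurd rfl hne
    | cons r0 vs => exact ⟨r0, vs, rfl⟩
  obtain ⟨a, as, rfl⟩ : ∃ a as, r0 = a :: as := by
    cases r0 with
    | nil => simp at hrow
    | cons a as => exact ⟨a, as, rfl⟩
  show menorPos _ = menorPos_alt _
  unfold menorPos menorPos_alt
  simp only [List.headD_cons]
  rw [rowsA _ a a _ (le_refl a), rowsB_min]
  set rs := (a :: as) :: vs with hrs
  set m' := rs.foldl (fun a r => r.foldl min a) a with hm'
  by_cases hlt : m' < a
  · have hfind : ∃ y, rs.find? (fun row => row.contains m') = some y := by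
      rcases rowsMin_mem rs a with hc | hc
      · rw [← hm'] at hc; exact absurd hc (ne_of_lt hlt)
      · obtain ⟨r', hr', hmem⟩ := hc
        rw [← hm'] at hmem
        have : (rs.find? (fun row => row.contains m')).isSome := by
          rw [List.find?_isSome]
          exact ⟨r', hr', by simpa using hmem⟩
        exact Option.isSome_iff_exists.mp this
    obtain ⟨y, hy⟩ := hfind
    rw [if_pos hlt, hy]
    rfl
  · have heq : m' = a := le_antisymm (rowsMin_le rs a) (not_lt.mp hlt)
    have hcont : (a :: as).contains m' = true := by
      rw [heq]
      simp
    have hfind : rs.find? (fun row => row.contains m') = some (a :: as) := by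
      rw [hrs, List.find?_cons, hcont]
    rw [if_neg hlt, hfind]
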